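-- pv_equiv track=rewrite | github.com/hanjunlei11/algorithm | zha_bu_pai_lie.py | pailie
-- ===== SOURCE A (Python) =====
-- def pailie(N,D,location):
--     dp = 0
--     j = 0
--     for i in range(2,N):
--             while (location[i]-location[j])>D and j<i:
--                 j += 1
--             n = i-j
--             dp = (dp+n*(n-1)//2)%99997867 if n>=2 else dp
--     return dp
-- ===== SOURCE B (Python) =====
-- def pailie(N, D, location):
--     dp = 0
--     for i in range(2, N):
--         lo, hi = 0, i
--         while lo < hi:
--             mid = (lo + hi) // 2
--             if location[i] - location[mid] <= D:
--                 hi = mid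
--             else:
--                 lo = mid + 1
--         n = i - lo
--         if n >= 2:
--             dp = (dp + n * (n - 1) // 2) % 99997867
--     return dp
-- ===== Notes on version B (the rewrite author's own statement) =====
-- stated objective: alternative
-- what changed: B drops A's shared monotone left pointer entirely and instead recomputes the left window boundary for each i by a fresh binary search over [0, i) with the same subtraction comparison, which is exact whenever the accessed prefix location[:N] is nondecreasing (the sorted arrays the function is written for).
-- outside the precondition, e.g. on pailie(3, 1, [5, 1, 3]): A returns 1, B returns 0
import Mathlib
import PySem

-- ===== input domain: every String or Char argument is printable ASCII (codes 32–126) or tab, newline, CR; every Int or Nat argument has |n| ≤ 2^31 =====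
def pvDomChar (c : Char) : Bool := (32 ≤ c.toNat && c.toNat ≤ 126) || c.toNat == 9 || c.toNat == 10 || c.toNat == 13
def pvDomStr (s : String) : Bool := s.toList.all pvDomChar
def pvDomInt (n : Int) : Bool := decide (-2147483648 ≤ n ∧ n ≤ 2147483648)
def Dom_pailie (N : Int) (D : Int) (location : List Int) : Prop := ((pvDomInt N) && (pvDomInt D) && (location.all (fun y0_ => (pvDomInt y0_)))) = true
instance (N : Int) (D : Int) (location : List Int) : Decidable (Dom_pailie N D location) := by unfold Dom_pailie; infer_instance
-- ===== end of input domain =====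

-- B replaces A's shared monotone left pointer by a per-i binary search for the left
-- window boundary, exact on the sorted arrays the function is for (objective: alternative).

-- ===== PORT A =====
-- inner 'while (location[i]-location[j])>D and j<i: j += 1'
def pailieWhile (D : Int) (location : List Int) (i : Int) (j : Int) : Int :=
  if h : PySem.List.pyGetD location i 0 - PySem.List.pyGetD location j 0 > D ∧ j < i then
    pailieWhile D location i (j + 1)
  else j
termination_by (i - j).toNat
decreasing_by omega

def pailie (N : Int) (D : Int) (location : List Int) : Int :=
  ((PySem.List.pyRange 2 N 1).foldl (fun (s : Int × Int) i =>
      let j := pailieWhile D location i s.2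
      let n := i - j
      (if n ≥ 2 then PySem.Int.mod (s.1 + PySem.Int.floordiv (n * (n - 1)) 2) 99997867 else s.1, j))
    (0, 0)).1

-- ===== PORT B =====
-- 'while lo < hi: mid = (lo+hi)//2; if location[i]-location[mid] <= D: hi = mid else: lo = mid+1'
def pailieBsearch (D : Int) (location : List Int) (i : Int) (lo : Int) (hi : Int) : Int :=
  if h : lo < hi then
    let mid := PySem.Int.floordiv (lo + hi) 2
    if PySem.List.pyGetD location i 0 - PySem.List.pyGetD location mid 0 ≤ D then
      pailieBsearch D location i lo mid
    else
      pailieBsearch D location i (mid + 1) hi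
  else lo
termination_by (hi - lo).toNat
decreasing_by
  · have h1 : 2 * PySem.Int.floordiv (lo + hi) 2 ≤ lo + hi := by
      rw [PySem.Int.floordiv_eq_ediv_of_pos (by norm_num)]; omega
    omega
  · have h2 : lo + hi < 2 * (PySem.Int.floordiv (lo + hi) 2 + 1) := by
      rw [PySem.Int.floordiv_eq_ediv_of_pos (by norm_num)]; omega
    omega

def pailie_alt (N : Int) (D : Int) (location : List Int) : Int :=
  (PySem.List.pyRange 2 N 1).foldl (fun (dp : Int) i =>
      let lo := pailieBsearch D location i 0 i
      let n := i - lo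
      if n ≥ 2 then PySem.Int.mod (dp + PySem.Int.floordiv (n * (n - 1)) 2) 99997867 else dp)
    0

-- ===== PRECONDITION & SPEC =====
-- Pre_ restricts to the function's natural domain: the accessed prefix location[:N] is
-- nondecreasing (the 'sorted array' the task is about; A's value on unsorted lists is an
-- artefact of its leftover pointer state, see the cite), and it excludes
-- N > len(location) with N ≥ 3, where A raises IndexError.
def Pre_pailie (N : Int) (D : Int) (location : List Int) : Prop :=
  (N ≤ 2 ∨ N ≤ (location.length : Int)) ∧ (location.take N.toNat).Pairwise (· ≤ ·)
instance (N : Int) (D : Int) (location : List Int) : Decidable (Pre_pailie N D location) := by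
  unfold Pre_pailie; infer_instance
def pvWitness_pailie : Int × Int × List Int := (5, 3, [1, 2, 4, 8, 9])

def Spec_pailie (N : Int) (D : Int) (location : List Int) (out : Int) : Prop := out = pailie_alt N D location
instance (N : Int) (D : Int) (location : List Int) (out : Int) : Decidable (Spec_pailie N D location out) := by unfold Spec_pailie; infer_instance

-- ===== CLAIM (what is proved, stated in full; the proofs are below) =====
def Claim_equal_pailie : Prop := ∀ (N : Int) (D : Int) (location : List Int), Dom_pailie N D location → Pre_pailie N D location → Spec_pailie N D location (pailie N D location)

-- ===== LEMMAS AND PROOFS =====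

-- abbreviation used only in the proofs
def pL (location : List Int) (k : Int) : Int := PySem.List.pyGetD location k 0

-- prefix sortedness gives monotone element access on in-range indices below M
lemma pL_mono (location : List Int) (M : Int)
    (hs : (location.take M.toNat).Pairwise (· ≤ ·)) (a b : Int)
    (ha : 0 ≤ a) (hab : a ≤ b) (hbM : b < M) (hb : b < (location.length : Int)) :
    pL location a ≤ pL location b := by
  have ha' : a < (location.length : Int) := lt_of_le_of_lt hab hb
  have hbn : 0 ≤ b := le_trans ha hab
  rw [pL, pL, PySem.List.pyGetD_eq_getElem location 0 ha ha',
      PySem.List.pyGetD_eq_getElem location 0 hbn hb]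
  rcases eq_or_lt_of_le hab with heq | hlt
  · subst heq; exact le_refl _
  · have hlen : (location.take M.toNat).length = min M.toNat location.length := by
      simp [List.length_take]
    have h := List.pairwise_iff_getElem.mp hs a.toNat b.toNat
      (by omega) (by omega) (by omega)
    simpa [List.getElem_take] using h

-- characterization of A's while loop: result r has no admissible k in [j, r), and r < i admits r
lemma pailieWhile_char (D : Int) (location : List Int) (i : Int) :
    ∀ (fuel : Nat) (j : Int), (i - j).toNat ≤ fuel → j ≤ i →
    j ≤ pailieWhile D location i j ∧ pailieWhile D location i j ≤ i ∧
    (∀ k, j ≤ k → k < pailieWhile D location i j → pL location i - pL location k > D) ∧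
    (pailieWhile D location i j < i → pL location i - pL location (pailieWhile D location i j) ≤ D) := by
  intro fuel
  induction fuel with
  | zero =>
      intro j hf hji
      have hji' : j = i := by omega
      subst hji'
      rw [pailieWhile, dif_neg (by omega)]
      exact ⟨le_refl _, le_refl _, fun k hk1 hk2 => absurd hk2 (by omega),
        fun h => absurd h (by omega)⟩
  | succ m ih =>
      intro j hf hji
      rw [pailieWhile]
      by_cases h : PySem.List.pyGetD location i 0 - PySem.List.pyGetD location j 0 > D ∧ j < i
      · simp only [h, and_self, dite_true]
        obtain ⟨h1, h2, h3, h4⟩ := ih (j + 1) (by omega) (by omega)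
        refine ⟨by omega, h2, fun k hk1 hk2 => ?_, h4⟩
        rcases eq_or_lt_of_le hk1 with heq | hlt
        · subst heq; exact h.1
        · exact h3 k (by omega) hk2
      · simp only [h, dite_false]
        refine ⟨le_refl _, hji, fun k hk1 hk2 => absurd (lt_of_le_of_lt hk1 hk2) (lt_irrefl _),
          fun hlt => ?_⟩
        rcases not_and_or.mp h with h' | h'
        · exact le_of_not_gt h'
        · exact absurd hlt h'

-- characterization of B's binary search from an invariant-carrying state
lemma pailieBsearch_char (D : Int) (location : List Int) (i : Int) (M : Int)
    (hs : (location.take M.toNat).Pairwise (· ≤ ·)) (hiM : i < M)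
    (hil : i < (location.length : Int)) :
    ∀ (fuel : Nat) (lo hi : Int), (hi - lo).toNat ≤ fuel → 0 ≤ lo → lo ≤ hi → hi ≤ i →
    (∀ k, 0 ≤ k → k < lo → pL location i - pL location k > D) →
    (∀ k, hi ≤ k → k < i → pL location i - pL location k ≤ D) →
    lo ≤ pailieBsearch D location i lo hi ∧ pailieBsearch D location i lo hi ≤ hi ∧
    (∀ k, 0 ≤ k → k < pailieBsearch D location i lo hi → pL location i - pL location k > D) ∧
    (pailieBsearch D location i lo hi < i → pL location i - pL location (pailieBsearch D location i lo hi) ≤ D) := by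
  intro fuel
  induction fuel with
  | zero =>
      intro lo hi hf h0 hlh hhi hL hR
      have : lo = hi := by omega
      subst this
      rw [pailieBsearch]
      simp only [lt_irrefl, dite_false]
      exact ⟨le_refl _, le_refl _, hL, fun h => hR lo (le_refl _) h⟩
  | succ m ih =>
      intro lo hi hf h0 hlh hhi hL hR
      rw [pailieBsearch]
      by_cases h : lo < hi
      · simp only [h, dite_true]
        have hmid1 : lo ≤ PySem.Int.floordiv (lo + hi) 2 := by
          rw [PySem.Int.floordiv_eq_ediv_of_pos (by norm_num)]; omega
        have hmid2 : PySem.Int.floordiv (lo + hi) 2 < hi := by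
          rw [PySem.Int.floordiv_eq_ediv_of_pos (by norm_num)]; omega
        set mid := PySem.Int.floordiv (lo + hi) 2 with hmid
        by_cases hc : PySem.List.pyGetD location i 0 - PySem.List.pyGetD location mid 0 ≤ D
        · simp only [hc, if_true]
          obtain ⟨c1, c2, c3, c4⟩ := ih lo mid (by omega) h0 hmid1 (by omega) hL
            (fun k hk1 hk2 => by
              -- monotone: cond(mid) → cond(k) for k ≥ mid
              have := pL_mono location M hs mid k (by omega) hk1 (by omega) (by omega)
              have hc' : pL location i - pL location mid ≤ D := hc
              simp only [pL] at *
              omega)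
          exact ⟨c1, by omega, c3, c4⟩
        · simp only [hc, if_false]
          obtain ⟨c1, c2, c3, c4⟩ := ih (mid + 1) hi (by omega) (by omega) (by omega) hhi
            (fun k hk1 hk2 => by
              -- antitone: ¬cond(mid) → ¬cond(k) for k ≤ mid
              by_cases hkl : k < lo
              · exact hL k hk1 hkl
              · have := pL_mono location M hs k mid hk1 (by omega) (by omega) (by omega)
                have hc' : ¬ pL location i - pL location mid ≤ D := hc
                simp only [pL] at *
                omega) hR
          exact ⟨by omega, c2, c3, c4⟩
      · simp only [h, dite_false]
        have : lo = hi := by omega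
        subst this
        exact ⟨le_refl _, le_refl _, hL, fun hlt => hR lo (le_refl _) hlt⟩

-- on sorted input, the while-advance from an invariant state equals the fresh binary search
lemma while_eq_bsearch (D : Int) (location : List Int) (i j M : Int)
    (hs : (location.take M.toNat).Pairwise (· ≤ ·)) (hj0 : 0 ≤ j) (hji : j ≤ i)
    (hiM : i < M) (hil : i < (location.length : Int))
    (hinv : ∀ k, 0 ≤ k → k < j → pL location i - pL location k > D) :
    pailieWhile D location i j = pailieBsearch D location i 0 i := by
  obtain ⟨a1, a2, a3, a4⟩ := pailieWhile_char D location i (i - j).toNat j (le_refl _) hji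
  obtain ⟨b1, b2, b3, b4⟩ := pailieBsearch_char D location i M hs hiM hil
    i.toNat 0 i (by omega) (le_refl _) (by omega) (le_refl _)
    (fun k hk1 hk2 => absurd (lt_of_le_of_lt hk1 hk2) (lt_irrefl _))
    (fun k hk1 hk2 => absurd (lt_of_le_of_lt hk1 hk2) (lt_irrefl _))
  set r1 := pailieWhile D location i j
  set r2 := pailieBsearch D location i 0 i
  rcases lt_trichotomy r1 r2 with hlt | heq | hgt
  · -- r1 < r2 ≤ i → cond r1; but r1 < r2 → ¬cond r1
    have hc := a4 (lt_of_lt_of_le hlt b2)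
    have hn := b3 r1 (by omega) hlt
    omega
  · exact heq
  · -- r2 < r1 ≤ i → cond r2; but r2 < r1: either r2 < j (invariant) or j ≤ r2 < r1 (a3)
    have hc := b4 (lt_of_lt_of_le hgt a2)
    by_cases hj : r2 < j
    · have := hinv r2 b1 hj; omega
    · have := a3 r2 (by omega) hgt; omega

-- main fold equality with the pointer invariant threaded through
lemma fold_eq (D : Int) (location : List Int) (M : Int)
    (hs : (location.take M.toNat).Pairwise (· ≤ ·)) :
    ∀ (l : List Int) (j dp : Int),
      0 ≤ j → (∀ i ∈ l, j ≤ i ∧ i < M ∧ i < (location.length : Int)) → l.Pairwise (· < ·) →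
      (∀ i ∈ l, ∀ k, 0 ≤ k → k < j → pL location i - pL location k > D) →
      (l.foldl (fun (s : Int × Int) i =>
          let j := pailieWhile D location i s.2
          let n := i - j
          (if n ≥ 2 then PySem.Int.mod (s.1 + PySem.Int.floordiv (n * (n - 1)) 2) 99997867 else s.1, j))
        (dp, j)).1 =
      l.foldl (fun (dp : Int) i =>
          let lo := pailieBsearch D location i 0 i
          let n := i - lo
          if n ≥ 2 then PySem.Int.mod (dp + PySem.Int.floordiv (n * (n - 1)) 2) 99997867 else dp)
        dp := by
  intro l
  induction l with
  | nil => intro j dp _ _ _ _; rfl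
  | cons i t ih =>
      intro j dp h0 hmem hpw hinv
      obtain ⟨hji, hiM, hil⟩ := hmem i (List.mem_cons_self ..)
      have heq := while_eq_bsearch D location i j M hs h0 hji hiM hil
        (hinv i (List.mem_cons_self ..))
      simp only [List.foldl_cons]
      rw [heq]
      set r := pailieBsearch D location i 0 i with hr
      obtain ⟨a1, a2, a3, _⟩ := pailieWhile_char D location i (i - j).toNat j (le_refl _) hji
      rw [heq] at a1 a2 a3
      apply ih r _ (by omega) (fun i' hi' => ⟨le_trans a2 (le_of_lt (List.rel_of_pairwise_cons hpw hi')), (hmem i' (List.mem_cons_of_mem _ hi')).2⟩) hpw.of_cons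
      -- invariant for the tail: k < r → loc[i'] - loc[k] > D for i' > i
      intro i' hi' k hk1 hk2
      have hii' : i < i' := List.rel_of_pairwise_cons hpw hi'
      obtain ⟨_, hi'M, hi'l⟩ := hmem i' (List.mem_cons_of_mem _ hi')
      have hmono := pL_mono location M hs i i' (by omega) (le_of_lt hii') hi'M hi'l
      by_cases hkj : k < j
      · have := hinv i (List.mem_cons_self ..) k hk1 hkj; omega
      · have := a3 k (by omega) hk2; omega

-- ===== VERDICT (by name: the statement is the Claim_ definition above) =====
theorem pailie_spec : Claim_equal_pailie := by
  intro N D location _ hpre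
  unfold Spec_pailie pailie pailie_alt
  obtain ⟨hN, hs⟩ := hpre
  apply fold_eq D location N hs (PySem.List.pyRange 2 N 1) 0 0 (le_refl 0)
    (fun i hi => ?_) (PySem.List.pairwise_lt_pyRange_one 2 N)
    (fun i _ k hk1 hk2 => absurd (lt_of_le_of_lt hk1 hk2) (lt_irrefl _))
  have := (PySem.List.mem_pyRange_one).mp hi
  refine ⟨by omega, by omega, ?_⟩
  rcases hN with h | h <;> omega
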